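-- pv_equiv track=rewrite | github.com/rahidz/WordleSolver | solver.py | compute_letter_distributions
-- ===== SOURCE A (Python) =====
-- from typing import List, Dict, Tuple, Set, Optional, Any
--
-- Results = List[Tuple[str, int]]
--
-- Distribution = Dict[str, int]
--
-- PositionalDistribution = Dict[int, Distribution]
--
-- def compute_letter_distributions(results: Results) -> Tuple[Distribution, PositionalDistribution]:
--     """
--     Given `results` as a list of (word, frequency),
--     returns two dicts:
--       - overall: letter -> total weighted count across all words
--       - positional: pos -> { letter -> weighted count at that position }
--     """
--     overall: Distribution = {}
--     positional: PositionalDistribution = {}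
--
--     if not results:
--         return overall, positional
--
--     # assume all words same length
--     length = len(results[0][0])
--     for pos in range(length):
--         positional[pos] = {}
--
--     for word, freq in results:
--         lw = word.lower()
--         for i, ch in enumerate(lw):
--             overall[ch] = overall.get(ch, 0) + freq
--             positional[i][ch] = positional[i].get(ch, 0) + freq
--
--     return overall, positional
-- ===== SOURCE B (Python) =====
-- def compute_letter_distributions(results):
--     """
--     Same result as A: overall letter->weighted count and positional
--     pos->letter->weighted count, but computed by two single-purpose passes:
--     overall from a flat scan of the letters, positional by a transposed
--     position-outer / word-inner loop (one small dict per position).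
--     """
--     overall = {}
--     positional = {}
--     if not results:
--         return overall, positional
--
--     length = len(results[0][0])
--
--     for word, freq in results:
--         for ch in word.lower():
--             overall[ch] = overall.get(ch, 0) + freq
--
--     for pos in range(length):
--         dist = {}
--         for word, freq in results:
--             lw = word.lower()
--             if pos < len(lw):
--                 ch = lw[pos]
--                 dist[ch] = dist.get(ch, 0) + freq
--         positional[pos] = dist
--
--     return overall, positional
-- ===== Notes on version B (the rewrite author's own statement) =====
-- stated objective: alternative
-- what changed: A fills both dicts in one fused word-loop; B makes two single-purpose passes: overall from a flat scan of all letters, and positional by a transposed position-outer/word-inner loop that builds one small dict per position.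
import Mathlib
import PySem

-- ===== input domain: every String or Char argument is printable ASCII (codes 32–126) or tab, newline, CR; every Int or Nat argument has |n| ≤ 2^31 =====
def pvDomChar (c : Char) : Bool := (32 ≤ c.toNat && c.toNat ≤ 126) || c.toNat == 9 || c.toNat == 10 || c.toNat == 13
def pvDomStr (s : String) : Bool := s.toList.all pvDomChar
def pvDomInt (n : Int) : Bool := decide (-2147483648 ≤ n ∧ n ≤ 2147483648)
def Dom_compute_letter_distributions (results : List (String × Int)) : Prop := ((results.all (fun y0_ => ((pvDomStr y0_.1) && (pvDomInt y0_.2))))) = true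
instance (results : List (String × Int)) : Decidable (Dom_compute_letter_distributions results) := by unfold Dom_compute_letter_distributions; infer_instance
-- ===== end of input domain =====

-- B replaces A's single fused word-loop by two single-purpose passes: overall from a flat
-- scan of the letters, positional by a transposed position-outer / word-inner loop
-- (objective: alternative decomposition, same asymptotic cost).

-- ===== PORT A =====
-- body of A's `for word, freq in results:` loop (updates both dicts, char by char)
def cldA_step (st : PySem.Dict String Int × PySem.Dict Int (PySem.Dict String Int))
    (wf : String × Int) : PySem.Dict String Int × PySem.Dict Int (PySem.Dict String Int) :=
  (PySem.List.enumerate (PySem.Str.lower wf.1).toList 0).foldl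
    (fun st ic =>
      let ch : String := String.ofList [ic.2]
      (st.1.insert ch (st.1.getD ch 0 + wf.2),
       -- `positional[i][ch] = positional[i].get(ch, 0) + freq`; Python raises KeyError when
       -- i is not a key of positional — Pre_ excludes those inputs (getD defaults here).
       st.2.insert ic.1 ((st.2.getD ic.1 PySem.Dict.empty).insert ch
         ((st.2.getD ic.1 PySem.Dict.empty).getD ch 0 + wf.2))))
    st

def compute_letter_distributions (results : List (String × Int)) :
    (List (String × Int)) × (List (Int × List (String × Int))) :=
  match results with
  | [] => ([], [])
  | (w0, f0) :: rest =>
    let length : Int := (w0.toList.length : Int)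
    let positional0 : PySem.Dict Int (PySem.Dict String Int) :=
      (PySem.List.pyRange 0 length 1).foldl
        (fun d pos => d.insert pos PySem.Dict.empty) PySem.Dict.empty
    let st := ((w0, f0) :: rest).foldl cldA_step (PySem.Dict.empty, positional0)
    (st.1.items, st.2.items.map (fun p => (p.1, p.2.items)))

-- ===== PORT B =====
-- pass 1 body: `for ch in word.lower(): overall[ch] = overall.get(ch, 0) + freq`
def cldB_ovStep (ov : PySem.Dict String Int) (wf : String × Int) : PySem.Dict String Int :=
  (PySem.Str.lower wf.1).toList.foldl
    (fun ov c =>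
      let ch : String := String.ofList [c]
      ov.insert ch (ov.getD ch 0 + wf.2)) ov

-- pass 2 inner body: conditional update of the per-position dict with one word
def cldB_distStep (pos : Int) (d : PySem.Dict String Int) (wf : String × Int) :
    PySem.Dict String Int :=
  let lw := (PySem.Str.lower wf.1).toList
  if pos < (lw.length : Int) then
    -- `lw[pos]`: the guard ensures 0 ≤ pos < len lw, so the default is never used
    let ch : String := String.ofList [PySem.List.pyGetD lw pos ' ']
    d.insert ch (d.getD ch 0 + wf.2)
  else d

-- `dist` for one position: a scan over all words
def cldB_dist (results : List (String × Int)) (pos : Int) : PySem.Dict String Int :=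
  results.foldl (cldB_distStep pos) PySem.Dict.empty

def compute_letter_distributions_alt (results : List (String × Int)) :
    (List (String × Int)) × (List (Int × List (String × Int))) :=
  match results with
  | [] => ([], [])
  | (w0, _) :: _ =>
    let length : Int := (w0.toList.length : Int)
    let overall := results.foldl cldB_ovStep PySem.Dict.empty
    let positional : PySem.Dict Int (PySem.Dict String Int) :=
      (PySem.List.pyRange 0 length 1).foldl
        (fun pd pos => pd.insert pos (cldB_dist results pos)) PySem.Dict.empty
    (overall.items, positional.items.map (fun p => (p.1, p.2.items)))

-- ===== PRECONDITION & SPEC =====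
-- Pre_ excludes exactly the inputs where A raises KeyError: a word strictly longer than the
-- first word (the code assumes all words have the first word's length; shorter words are fine).
def Pre_compute_letter_distributions (results : List (String × Int)) : Prop :=
  ∀ p ∈ results, p.1.toList.length ≤ (results.headD ("", 0)).1.toList.length
instance (results : List (String × Int)) : Decidable (Pre_compute_letter_distributions results) := by
  unfold Pre_compute_letter_distributions; infer_instance
def pvWitness_compute_letter_distributions : (List (String × Int)) := [("Ab", 2), ("b", 1)]

def Spec_compute_letter_distributions (results : List (String × Int)) (out : (List (String × Int)) × (List (Int × List (String × Int)))) : Prop := out = compute_letter_distributions_alt results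
instance (results : List (String × Int)) (out : (List (String × Int)) × (List (Int × List (String × Int)))) : Decidable (Spec_compute_letter_distributions results out) := by unfold Spec_compute_letter_distributions; infer_instance

-- ===== CLAIM (what is proved, stated in full; the proofs are below) =====
def Claim_equal_compute_letter_distributions : Prop := ∀ (results : List (String × Int)), Dom_compute_letter_distributions results → Pre_compute_letter_distributions results → Spec_compute_letter_distributions results (compute_letter_distributions results)

-- ===== LEMMAS AND PROOFS =====

-- a fold whose step updates the two components independently splits into two folds
theorem cld_foldl_prod {α β γ : Type} (F : β × γ → α → β × γ) (f : β → α → β) (g : γ → α → γ)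
    (h : ∀ st x, F st x = (f st.1 x, g st.2 x)) :
    ∀ (l : List α) (st : β × γ), l.foldl F st = (l.foldl f st.1, l.foldl g st.2) := by
  intro l
  induction l with
  | nil => intro st; rfl
  | cons x xs ih => intro st; simp only [List.foldl_cons, h, ih]

-- the positional half of A's per-word loop, in isolation
def cldA_posWord (pd : PySem.Dict Int (PySem.Dict String Int)) (wf : String × Int) :
    PySem.Dict Int (PySem.Dict String Int) :=
  (PySem.List.enumerate (PySem.Str.lower wf.1).toList 0).foldl
    (fun pd ic =>
      let ch : String := String.ofList [ic.2]
      pd.insert ic.1 ((pd.getD ic.1 PySem.Dict.empty).insert ch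
        ((pd.getD ic.1 PySem.Dict.empty).getD ch 0 + wf.2)))
    pd

theorem cldA_step_eq (st : PySem.Dict String Int × PySem.Dict Int (PySem.Dict String Int))
    (wf : String × Int) : cldA_step st wf = (cldB_ovStep st.1 wf, cldA_posWord st.2 wf) := by
  unfold cldA_step cldB_ovStep cldA_posWord
  have hsplit := cld_foldl_prod
    (fun (st : PySem.Dict String Int × PySem.Dict Int (PySem.Dict String Int)) (ic : Int × Char) =>
      let ch : String := String.ofList [ic.2]
      (st.1.insert ch (st.1.getD ch 0 + wf.2),
       st.2.insert ic.1 ((st.2.getD ic.1 PySem.Dict.empty).insert ch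
         ((st.2.getD ic.1 PySem.Dict.empty).getD ch 0 + wf.2))))
    (fun ov (ic : Int × Char) =>
      let ch : String := String.ofList [ic.2]
      ov.insert ch (ov.getD ch 0 + wf.2))
    (fun pd (ic : Int × Char) =>
      let ch : String := String.ofList [ic.2]
      pd.insert ic.1 ((pd.getD ic.1 PySem.Dict.empty).insert ch
        ((pd.getD ic.1 PySem.Dict.empty).getD ch 0 + wf.2)))
    (fun _ _ => rfl)
    (PySem.List.enumerate (PySem.Str.lower wf.1).toList 0) st
  rw [hsplit]
  congr 1
  conv_rhs => rw [← PySem.List.map_snd_enumerate (PySem.Str.lower wf.1).toList 0]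
  rw [List.foldl_map]

theorem cld_lower_length (s : String) :
    (PySem.Str.lower s).toList.length = s.toList.length := by
  simp [PySem.Str.toList_lower, PySem.Chars.lower]

theorem cld_items_shape_keys {length : Int} (pd : PySem.Dict Int (PySem.Dict String Int))
    (g : Int → PySem.Dict String Int)
    (hpd : pd.items = (PySem.List.pyRange 0 length 1).map (fun pos => (pos, g pos))) :
    pd.keys = PySem.List.pyRange 0 length 1 := by
  simp only [PySem.Dict.keys, hpd, List.map_map]
  exact List.map_id _

theorem cld_insert_shape {length : Int} (pd : PySem.Dict Int (PySem.Dict String Int))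
    (g : Int → PySem.Dict String Int)
    (hpd : pd.items = (PySem.List.pyRange 0 length 1).map (fun pos => (pos, g pos)))
    (i : Int) (hi0 : 0 ≤ i) (hi : i < length) (v : PySem.Dict String Int) :
    (pd.insert i v).items =
      (PySem.List.pyRange 0 length 1).map
        (fun pos => (pos, if pos = i then v else g pos)) := by
  have hc : pd.contains i = true := by
    rw [PySem.Dict.contains_iff_mem_keys, cld_items_shape_keys pd g hpd,
      PySem.List.mem_pyRange_one]
    exact ⟨hi0, hi⟩
  rw [PySem.Dict.items_insert_of_contains pd v hc, hpd, List.map_map]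
  apply List.map_congr_left
  intro pos _
  by_cases h : pos = i
  · subst h; simp
  · simp [h]

theorem cld_getD_shape {length : Int} (pd : PySem.Dict Int (PySem.Dict String Int))
    (g : Int → PySem.Dict String Int)
    (hpd : pd.items = (PySem.List.pyRange 0 length 1).map (fun pos => (pos, g pos)))
    (i : Int) (hi0 : 0 ≤ i) (hi : i < length) :
    pd.getD i PySem.Dict.empty = g i := by
  have hmem : (i, g i) ∈ pd.items := by
    rw [hpd]
    exact List.mem_map_of_mem (by rw [PySem.List.mem_pyRange_one]; exact ⟨hi0, hi⟩)
  have hnd : pd.keys.Nodup := by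
    rw [cld_items_shape_keys pd g hpd]; exact PySem.List.nodup_pyRange_one 0 length
  exact PySem.Dict.getD_of_mem_items pd hmem hnd _

-- scanning one word's suffix (chars cs with running index starting at s) updates pointwise
theorem cld_word_scan {length : Int} (freq : Int) :
    ∀ (cs : List Char) (s : Int) (g : Int → PySem.Dict String Int)
      (pd : PySem.Dict Int (PySem.Dict String Int)),
      pd.items = (PySem.List.pyRange 0 length 1).map (fun pos => (pos, g pos)) →
      0 ≤ s → s + cs.length ≤ length →
      ((PySem.List.enumerate cs s).foldl
        (fun pd ic =>
          let ch : String := String.ofList [ic.2]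
          pd.insert ic.1 ((pd.getD ic.1 PySem.Dict.empty).insert ch
            ((pd.getD ic.1 PySem.Dict.empty).getD ch 0 + freq)))
        pd).items =
      (PySem.List.pyRange 0 length 1).map
        (fun pos => (pos,
          if s ≤ pos ∧ pos < s + cs.length then
            let ch : String := String.ofList [cs.getD (pos.toNat - s.toNat) ' ']
            (g pos).insert ch ((g pos).getD ch 0 + freq)
          else g pos)) := by
  intro cs
  induction cs with
  | nil =>
    intro s g pd hpd hs0 hs
    simp only [PySem.List.enumerate_nil, List.foldl_nil]
    rw [hpd]
    apply List.map_congr_left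
    intro pos _
    simp
  | cons c cs ih =>
    intro s g pd hpd hs0 hs
    have hlen : ((c :: cs).length : Int) = (cs.length : Int) + 1 := by push_cast [List.length_cons]; ring
    have hslen : s < length := by omega
    simp only [PySem.List.enumerate_cons, List.foldl_cons]
    have hgd := cld_getD_shape pd g hpd s hs0 hslen
    rw [hgd]
    have hstep := cld_insert_shape pd g hpd s hs0 hslen
      ((g s).insert (String.ofList [c]) ((g s).getD (String.ofList [c]) 0 + freq))
    rw [ih (s + 1)
      (fun pos => if pos = s then
        (g s).insert (String.ofList [c]) ((g s).getD (String.ofList [c]) 0 + freq)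
      else g pos)
      _ hstep (by omega) (by omega)]
    apply List.map_congr_left
    intro pos hpos
    rw [PySem.List.mem_pyRange_one] at hpos
    by_cases hps : pos = s
    · subst hps
      have h1 : ¬ (pos + 1 ≤ pos ∧ pos < pos + 1 + (cs.length : Int)) := by omega
      have h2 : pos ≤ pos ∧ pos < pos + ((c :: cs).length : Int) := by omega
      simp only [if_neg h1, if_pos h2]
      have : pos.toNat - pos.toNat = 0 := by omega
      rw [this]
      rfl
    · by_cases hmid : s + 1 ≤ pos ∧ pos < s + 1 + (cs.length : Int)
      · have h2 : s ≤ pos ∧ pos < s + ((c :: cs).length : Int) := by omega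
        simp only [if_pos hmid, if_pos h2, if_neg hps]
        have hidx : pos.toNat - s.toNat = (pos.toNat - (s + 1).toNat) + 1 := by omega
        rw [hidx, List.getD_cons_succ]
      · have h2 : ¬ (s ≤ pos ∧ pos < s + ((c :: cs).length : Int)) := by omega
        simp only [if_neg hmid, if_neg h2, if_neg hps]

theorem cld_posWord_shape {length : Int} (wf : String × Int)
    (hw : ((PySem.Str.lower wf.1).toList.length : Int) ≤ length)
    (g : Int → PySem.Dict String Int) (pd : PySem.Dict Int (PySem.Dict String Int))
    (hpd : pd.items = (PySem.List.pyRange 0 length 1).map (fun pos => (pos, g pos))) :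
    (cldA_posWord pd wf).items =
      (PySem.List.pyRange 0 length 1).map
        (fun pos => (pos, cldB_distStep pos (g pos) wf)) := by
  unfold cldA_posWord
  rw [cld_word_scan wf.2 (PySem.Str.lower wf.1).toList 0 g pd hpd le_rfl (by omega)]
  apply List.map_congr_left
  intro pos hpos
  rw [PySem.List.mem_pyRange_one] at hpos
  unfold cldB_distStep
  by_cases hlt : pos < ((PySem.Str.lower wf.1).toList.length : Int)
  · have hcond : (0:Int) ≤ pos ∧ pos < 0 + ((PySem.Str.lower wf.1).toList.length : Int) := by
      constructor <;> omega
    simp only [if_pos hcond, if_pos hlt]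
    have hc : (PySem.Str.lower wf.1).toList.getD (pos.toNat - (0:Int).toNat) ' ' =
        PySem.List.pyGetD (PySem.Str.lower wf.1).toList pos ' ' := by
      rw [PySem.List.pyGetD_eq_getElem _ _ hpos.1 hlt,
        List.getD_eq_getElem _ _ (by omega)]
      simp
    rw [hc]
  · have hcond : ¬ ((0:Int) ≤ pos ∧ pos < 0 + ((PySem.Str.lower wf.1).toList.length : Int)) := by
      omega
    simp only [if_neg hcond, if_neg hlt]

theorem cld_posFold_shape {length : Int} :
    ∀ (ws : List (String × Int)) (g : Int → PySem.Dict String Int)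
      (pd : PySem.Dict Int (PySem.Dict String Int)),
      pd.items = (PySem.List.pyRange 0 length 1).map (fun pos => (pos, g pos)) →
      (∀ wf ∈ ws, ((PySem.Str.lower wf.1).toList.length : Int) ≤ length) →
      (ws.foldl cldA_posWord pd).items =
        (PySem.List.pyRange 0 length 1).map
          (fun pos => (pos, ws.foldl (cldB_distStep pos) (g pos))) := by
  intro ws
  induction ws with
  | nil => intro g pd hpd _; simpa using hpd
  | cons wf ws ih =>
    intro g pd hpd hws
    simp only [List.foldl_cons]
    exact ih _ _ (cld_posWord_shape wf (hws wf (by simp)) g pd hpd)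
      (fun x hx => hws x (by simp [hx]))

theorem cld_init_shape (length : Int) :
    ((PySem.List.pyRange 0 length 1).foldl
      (fun d pos => d.insert pos PySem.Dict.empty)
      (PySem.Dict.empty : PySem.Dict Int (PySem.Dict String Int))).items =
    (PySem.List.pyRange 0 length 1).map
      (fun pos => (pos, (PySem.Dict.empty : PySem.Dict String Int))) := by
  refine (PySem.Dict.items_foldl_insert_fresh (PySem.List.pyRange 0 length 1)
    (fun pos => pos) (fun _ => (PySem.Dict.empty : PySem.Dict String Int)) PySem.Dict.empty
    (fun _ _ => PySem.Dict.contains_empty _)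
    (by simpa using PySem.List.nodup_pyRange_one 0 length)).trans ?_
  simp [PySem.Dict.empty]

theorem cld_B_pos_shape (results : List (String × Int)) (length : Int) :
    ((PySem.List.pyRange 0 length 1).foldl
      (fun pd pos => pd.insert pos (cldB_dist results pos))
      (PySem.Dict.empty : PySem.Dict Int (PySem.Dict String Int))).items =
    (PySem.List.pyRange 0 length 1).map
      (fun pos => (pos, cldB_dist results pos)) := by
  refine (PySem.Dict.items_foldl_insert_fresh (PySem.List.pyRange 0 length 1)
    (fun pos => pos) (fun pos => cldB_dist results pos) PySem.Dict.empty
    (fun _ _ => PySem.Dict.contains_empty _)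
    (by simpa using PySem.List.nodup_pyRange_one 0 length)).trans ?_
  simp [PySem.Dict.empty]

-- ===== VERDICT (by name: the statement is the Claim_ definition above) =====
theorem compute_letter_distributions_spec : Claim_equal_compute_letter_distributions := by
  unfold Claim_equal_compute_letter_distributions Spec_compute_letter_distributions
  intro results _ hpre
  match results with
  | [] => rfl
  | (w0, f0) :: rest =>
    simp only [compute_letter_distributions, compute_letter_distributions_alt]
    rw [cld_foldl_prod cldA_step cldB_ovStep cldA_posWord cldA_step_eq]
    have hws : ∀ wf ∈ (w0, f0) :: rest,
        ((PySem.Str.lower wf.1).toList.length : Int) ≤ ((w0.toList.length : Nat) : Int) := by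
      intro wf hwf
      have h := hpre wf hwf
      simp only [List.headD_cons] at h
      rw [cld_lower_length]
      exact_mod_cast h
    have hA := cld_posFold_shape (length := ((w0.toList.length : Nat) : Int)) ((w0, f0) :: rest)
      (fun _ => PySem.Dict.empty) _ (cld_init_shape _) hws
    rw [hA, cld_B_pos_shape]
    rfl
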